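-- pv_equiv track=rewrite | github.com/nzoladkiewicz/CS-115 | Labs/Lab 8/hmmm_assembler.py | insertBits
-- ===== SOURCE A (Python) =====
-- def insertBits(a, b):
--     """Perform logical OR on a and b, preserving blanks in a.  Both a and
-- b must consist exclusively of blanks, 0s, and 1s."""
--     if a == ''  or  b == '':
--         return a
--     elif a[0] == ' ':
--         return ' ' + insertBits(a[1:], b)
--     elif b[0] == ' ':
--         return insertBits(a, b[1:])
--     elif a[0] == '1'  or  b[0] == '1':
--         return '1' + insertBits(a[1:], b[1:])
--     else:
--         return '0' + insertBits(a[1:], b[1:])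
-- ===== SOURCE B (Python) =====
-- def insertBits(a, b):
--     """Perform logical OR on a and b, preserving blanks in a.  Both a and
-- b must consist exclusively of blanks, 0s, and 1s."""
--     nb = [c for c in b if c != ' ']
--     out = []
--     j = 0
--     for i, c in enumerate(a):
--         if c == ' ':
--             out.append(' ')
--         elif j < len(nb):
--             out.append('1' if c == '1' or nb[j] == '1' else '0')
--             j += 1
--         else:
--             out.append(a[i:])
--             break
--     return ''.join(out)
-- ===== Notes on version B (the rewrite author's own statement) =====
-- stated objective: faster
-- what changed: Replaces the interleaved blank-skipping recursion (with repeated string slicing and concatenation) by a prefilter of b's non-blank bits followed by a single indexed pass over a that appends a's remaining tail verbatim once the bits are exhausted.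
import Mathlib
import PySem

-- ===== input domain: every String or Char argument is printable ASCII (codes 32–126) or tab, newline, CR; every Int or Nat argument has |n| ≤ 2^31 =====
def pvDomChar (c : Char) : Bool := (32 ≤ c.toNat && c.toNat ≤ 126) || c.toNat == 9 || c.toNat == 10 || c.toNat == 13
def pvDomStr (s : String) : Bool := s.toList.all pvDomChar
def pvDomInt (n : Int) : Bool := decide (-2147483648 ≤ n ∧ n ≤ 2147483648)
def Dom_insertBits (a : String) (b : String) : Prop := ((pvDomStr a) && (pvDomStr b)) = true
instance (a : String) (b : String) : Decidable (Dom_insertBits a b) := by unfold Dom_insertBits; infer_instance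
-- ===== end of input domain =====

-- B replaces A's interleaved blank-skipping recursion by a prefilter of b's non-blank
-- characters plus one indexed pass over a (objective: alternative decomposition).

-- ===== PORT A =====
-- A's recursion on the two strings, as lists of characters.
def insertBitsA : List Char → List Char → List Char
  | [], _ => []
  | a, [] => a
  | x :: a', y :: b' =>
    if x = ' ' then ' ' :: insertBitsA a' (y :: b')
    else if y = ' ' then insertBitsA (x :: a') b'
    else if x = '1' ∨ y = '1' then '1' :: insertBitsA a' b'
    else '0' :: insertBitsA a' b'
termination_by a b => a.length + b.length
decreasing_by all_goals (simp only [List.length_cons]; omega)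

def insertBits (a : String) (b : String) : String :=
  String.mk (insertBitsA a.toList b.toList)

-- ===== PORT B =====
-- Source B's pass over a, consuming the prefiltered non-blank bits of b one by one;
-- when they are exhausted, the rest of a is appended verbatim (the `break` branch).
def insertBitsGo : List Char → List Char → List Char
  | [], _ => []
  | x :: a', nb =>
    if x = ' ' then ' ' :: insertBitsGo a' nb
    else match nb with
      | [] => x :: a'
      | y :: nb' => (if x = '1' ∨ y = '1' then '1' else '0') :: insertBitsGo a' nb'

def insertBits_alt (a : String) (b : String) : String :=
  String.mk (insertBitsGo a.toList (b.toList.filter (· ≠ ' ')))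

-- ===== PRECONDITION & SPEC =====
def Spec_insertBits (a : String) (b : String) (out : String) : Prop := out = insertBits_alt a b
instance (a : String) (b : String) (out : String) : Decidable (Spec_insertBits a b out) := by unfold Spec_insertBits; infer_instance

-- ===== CLAIM (what is proved, stated in full; the proofs are below) =====
def Claim_equal_insertBits : Prop := ∀ (a : String) (b : String), Dom_insertBits a b → Spec_insertBits a b (insertBits a b)

-- ===== LEMMAS AND PROOFS =====
theorem insertBitsGo_cons (x : Char) (a' nb : List Char) :
    insertBitsGo (x :: a') nb =
      if x = ' ' then ' ' :: insertBitsGo a' nb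
      else match nb with
        | [] => x :: a'
        | y :: nb' => (if x = '1' ∨ y = '1' then '1' else '0') :: insertBitsGo a' nb' := by
  cases nb <;> rfl

theorem insertBitsGo_nil (a : List Char) : insertBitsGo a [] = a := by
  induction a with
  | nil => rfl
  | cons x a' ih =>
    rw [insertBitsGo_cons]
    split_ifs with h
    · rw [ih, h]
    · rfl

theorem insertBitsA_eq_go (a b : List Char) :
    insertBitsA a b = insertBitsGo a (b.filter (· ≠ ' ')) := by
  induction hn : a.length + b.length using Nat.strong_induction_on generalizing a b with
  | _ n ih =>
  subst hn
  match a, b with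
  | [], b => simp [insertBitsA, insertBitsGo]
  | x :: a', [] => simp [insertBitsA, insertBitsGo_nil]
  | x :: a', y :: b' =>
    by_cases hx : x = ' '
    · rw [insertBitsA, if_pos hx, insertBitsGo_cons, if_pos hx,
        ih _ (by simp only [List.length_cons]; omega) a' (y :: b') rfl]
    · by_cases hy : y = ' '
      · rw [insertBitsA, if_neg hx, if_pos hy,
          ih _ (by simp only [List.length_cons]; omega) (x :: a') b' rfl]
        simp [List.filter, hy]
      · have hf : (y :: b').filter (· ≠ ' ') = y :: b'.filter (· ≠ ' ') := by
          simp [List.filter, hy]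
        rw [insertBitsA, if_neg hx, if_neg hy, hf, insertBitsGo_cons, if_neg hx]
        by_cases h1 : x = '1' ∨ y = '1'
        · rw [if_pos h1]
          simp only [h1, if_true]
          rw [ih _ (by simp only [List.length_cons]; omega) a' b' rfl]
        · rw [if_neg h1]
          simp only [h1, if_false]
          rw [ih _ (by simp only [List.length_cons]; omega) a' b' rfl]

-- ===== VERDICT (by name: the statement is the Claim_ definition above) =====
theorem insertBits_spec : Claim_equal_insertBits := by
  intro a b _
  unfold Spec_insertBits insertBits insertBits_alt
  rw [insertBitsA_eq_go]
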